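-- pv_equiv track=rewrite | github.com/syJunia/Backup-generella-dokument-Sven | pig/summary.py | process_pos_seq
-- ===== SOURCE A (Python) =====
-- MAX_SAMPLE_COUNT = 4194304
--
-- def process_pos_seq(pos):
--     ret = []
--     base = 0
--     prev = -1
--     for p in pos:
--         tp = int(p)
--         if tp <= prev:
--             base += MAX_SAMPLE_COUNT
--         ret.append(tp+base)
--         prev = tp
--     return ret
-- ===== SOURCE B (Python) =====
-- MAX_SAMPLE_COUNT = 4194304
--
-- def process_pos_seq(pos):
--     ints = [int(p) for p in pos]
--     flags = [cur <= prv for prv, cur in zip([-1] + ints, ints)]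
--     offsets = []
--     total = 0
--     for f in flags:
--         if f:
--             total += MAX_SAMPLE_COUNT
--         offsets.append(total)
--     return [v + o for v, o in zip(ints, offsets)]
-- ===== Notes on version B (the rewrite author's own statement) =====
-- stated objective: alternative
-- what changed: Replaces A's single stateful loop (running base/prev) with three precomputed tables: an ints pass, a wrap-flag pass comparing each element to its predecessor seeded with -1, a prefix-sum of flag offsets, and a final elementwise zip-add.
import Mathlib
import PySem

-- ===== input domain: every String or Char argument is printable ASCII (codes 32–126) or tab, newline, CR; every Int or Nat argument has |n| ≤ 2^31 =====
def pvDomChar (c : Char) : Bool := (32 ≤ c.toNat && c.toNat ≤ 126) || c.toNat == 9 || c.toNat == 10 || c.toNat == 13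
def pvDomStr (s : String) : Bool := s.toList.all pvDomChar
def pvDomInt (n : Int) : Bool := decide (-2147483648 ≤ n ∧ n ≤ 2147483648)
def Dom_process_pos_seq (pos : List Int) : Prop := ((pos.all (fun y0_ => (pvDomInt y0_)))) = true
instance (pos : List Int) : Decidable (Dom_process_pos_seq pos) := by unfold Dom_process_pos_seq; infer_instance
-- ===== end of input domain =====

-- ===== PORT A =====
-- A: one stateful loop carrying (ret, base, prev), base bumped by MAX_SAMPLE_COUNT on wraps.
def process_pos_seq (pos : List Int) : List Int :=
  (pos.foldl (fun (st : List Int × Int × Int) p =>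
      let tp := p
      let base := if tp ≤ st.2.2 then st.2.1 + 4194304 else st.2.1
      (st.1 ++ [tp + base], base, tp))
    ([], 0, -1)).1

-- ===== PORT B =====
-- B: table-based — wrap flags vs predecessor (seeded -1), prefix-summed offsets, zip-add.
def pvOffsets (total : Int) (flags : List Bool) : List Int :=
  match flags with
  | [] => []
  | f :: rest =>
    let t := total + (if f then 4194304 else 0)
    t :: pvOffsets t rest

def process_pos_seq_alt (pos : List Int) : List Int :=
  let ints := pos
  let flags := (List.zip (-1 :: ints) ints).map (fun pc => decide (pc.2 ≤ pc.1))
  let offsets := pvOffsets 0 flags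
  List.zipWith (· + ·) ints offsets

-- ===== PRECONDITION & SPEC =====
def Spec_process_pos_seq (pos : List Int) (out : List Int) : Prop := out = process_pos_seq_alt pos
instance (pos : List Int) (out : List Int) : Decidable (Spec_process_pos_seq pos out) := by unfold Spec_process_pos_seq; infer_instance

-- ===== CLAIM (what is proved, stated in full; the proofs are below) =====
def Claim_equal_process_pos_seq : Prop := ∀ (pos : List Int), Dom_process_pos_seq pos → Spec_process_pos_seq pos (process_pos_seq pos)

-- ===== LEMMAS AND PROOFS =====

-- ===== VERDICT (by name: the statement is the Claim_ definition above) =====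
lemma pv_main (pos acc : List Int) (base prev : Int) :
    (pos.foldl (fun (st : List Int × Int × Int) p =>
        let tp := p
        let base := if tp ≤ st.2.2 then st.2.1 + 4194304 else st.2.1
        (st.1 ++ [tp + base], base, tp))
      (acc, base, prev)).1
    = acc ++ List.zipWith (· + ·) pos
        (pvOffsets base ((List.zip (prev :: pos) pos).map (fun pc => decide (pc.2 ≤ pc.1)))) := by
  induction pos generalizing acc base prev with
  | nil => simp
  | cons p rest ih =>
    simp only [List.foldl_cons, List.zip_cons_cons, List.map_cons, pvOffsets, List.zipWith_cons_cons]
    rw [ih]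
    by_cases h : p ≤ prev <;> simp [h]

-- ===== VERDICT (by name: the statement is the Claim_ definition above) =====
theorem process_pos_seq_spec : Claim_equal_process_pos_seq := by
  intro pos _
  unfold Spec_process_pos_seq process_pos_seq process_pos_seq_alt
  simpa using pv_main pos [] 0 (-1)
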